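-- pv_equiv track=rewrite | github.com/Aceinna/python-openimu | src/aceinna/devices/openimu/uart_provider.py | _build_model_string
-- ===== SOURCE A (Python) =====
-- def _build_model_string(data_range):
--     end = [0]
--     data = []
--     for item in data_range:
--         if item == 0:
--             break
--         data.append(item)
--
--     data.extend(end)
--     return data
-- ===== SOURCE B (Python) =====
-- def _build_model_string(data_range):
--     lst = list(data_range)
--     idx = lst.index(0) if 0 in lst else len(lst)
--     return lst[:idx] + [0]
-- ===== Notes on version B (the rewrite author's own statement) =====
-- stated objective: simpler
-- what changed: Replaces the append-until-break accumulation loop with a locate-then-slice decomposition: find the first zero's index (or len), slice the prefix, and append a trailing zero.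
import Mathlib
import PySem

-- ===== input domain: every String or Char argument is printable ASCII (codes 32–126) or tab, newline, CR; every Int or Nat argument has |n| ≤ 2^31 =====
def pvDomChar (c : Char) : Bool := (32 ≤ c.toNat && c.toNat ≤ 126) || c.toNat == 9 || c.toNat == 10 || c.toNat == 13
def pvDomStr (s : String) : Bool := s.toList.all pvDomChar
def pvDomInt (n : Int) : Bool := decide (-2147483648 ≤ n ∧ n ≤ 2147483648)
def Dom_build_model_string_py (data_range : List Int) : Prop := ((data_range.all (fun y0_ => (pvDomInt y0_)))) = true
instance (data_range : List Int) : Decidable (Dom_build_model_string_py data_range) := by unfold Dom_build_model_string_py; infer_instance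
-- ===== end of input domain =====

-- B replaces A's append-until-break loop by locating the first zero's index and slicing the prefix (simpler decomposition; return value only).
-- ===== PORT A =====
def pvALoop : List Int → List Int → List Int
  | [], data => data
  | x :: xs, data => if x == 0 then data else pvALoop xs (data ++ [x])

def build_model_string_py (data_range : List Int) : List Int :=
  let endl : List Int := [0]
  let data := pvALoop data_range []
  data ++ endl

-- ===== PORT B =====
def build_model_string_py_alt (data_range : List Int) : List Int :=
  let lst := data_range
  let idx : Nat := if (0 : Int) ∈ lst then (PySem.List.index? lst 0).getD 0 else lst.length
  PySem.List.slice lst none (some (idx : Int)) ++ [0]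

-- ===== PRECONDITION & SPEC =====
def Spec_build_model_string_py (data_range : List Int) (out : List Int) : Prop := out = build_model_string_py_alt data_range
instance (data_range : List Int) (out : List Int) : Decidable (Spec_build_model_string_py data_range out) := by unfold Spec_build_model_string_py; infer_instance

-- ===== CLAIM (what is proved, stated in full; the proofs are below) =====
def Claim_equal_build_model_string_py : Prop := ∀ (data_range : List Int), Dom_build_model_string_py data_range → Spec_build_model_string_py data_range (build_model_string_py data_range)

-- ===== LEMMAS AND PROOFS =====

lemma pvALoop_acc (xs : List Int) : ∀ acc : List Int, pvALoop xs acc = acc ++ pvALoop xs [] := by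
  induction xs with
  | nil => intro acc; simp [pvALoop]
  | cons x xs ih =>
    intro acc
    by_cases h : x = 0
    · simp [pvALoop, h]
    · simp [pvALoop, h]
      rw [ih [x], ih (acc ++ [x])]
      simp

lemma pvALoop_takeWhile (xs : List Int) : pvALoop xs [] = xs.takeWhile (fun x => x ≠ 0) := by
  induction xs with
  | nil => simp [pvALoop]
  | cons x xs ih =>
    by_cases h : x = 0
    · simp [pvALoop, h]
    · rw [show pvALoop (x :: xs) [] = pvALoop xs [x] from by simp [pvALoop, h]]
      rw [pvALoop_acc, ih]
      simp [h]

lemma pvB_take (xs : List Int) :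
    build_model_string_py_alt xs = xs.take (if (0:Int) ∈ xs then (PySem.List.index? xs 0).getD 0 else xs.length) ++ [0] := by
  unfold build_model_string_py_alt
  by_cases h : (0:Int) ∈ xs <;> simp [h, PySem.List.slice_to_natCast]

lemma take_idx_eq_takeWhile (xs : List Int) :
    xs.take (if (0:Int) ∈ xs then (PySem.List.index? xs 0).getD 0 else xs.length) = xs.takeWhile (fun x => x ≠ 0) := by
  induction xs with
  | nil => simp
  | cons x xs ih =>
    by_cases h : x = 0
    · subst h
      rw [PySem.List.index?_cons_self]
      simp
    · rw [PySem.List.index?_cons_of_ne xs h]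
      by_cases hm : (0:Int) ∈ xs
      · have hsome : (PySem.List.index? xs 0).isSome := (PySem.List.index?_isSome_iff _ _).mpr hm
        obtain ⟨k, hk⟩ := Option.isSome_iff_exists.mp hsome
        rw [hk]
        have h1 : (0:Int) ∈ x :: xs := List.mem_cons_of_mem _ hm
        rw [if_pos h1]
        simp only [Option.map_some, Option.getD_some, List.take_succ_cons, List.takeWhile_cons]
        rw [if_pos hm, hk] at ih
        simp only [Option.getD_some] at ih
        simp only [ne_eq, decide_not] at ih
        simp [h, ih]
      · have h1 : (0:Int) ∉ x :: xs := by
          simp [List.mem_cons, hm]; exact fun e => h e.symm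
        rw [if_neg h1]
        rw [if_neg hm] at ih
        simp [h, ih]

-- ===== VERDICT =====
theorem build_model_string_py_spec : Claim_equal_build_model_string_py := by
  intro xs _
  unfold Spec_build_model_string_py build_model_string_py
  rw [pvB_take, take_idx_eq_takeWhile, pvALoop_takeWhile]
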